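-- pv_equiv track=rewrite | github.com/morth-lab/SIMalign | SIMalign/utils.py | process_nested_dicts
-- ===== SOURCE A (Python) =====
-- from itertools import combinations
-- from collections import defaultdict
--
-- def process_nested_dicts(dicts, keys):
--     """
--     Optimized version of process_nested_dicts.
--     """
--     num_dicts = len(dicts)
--     # Pre-filter dictionaries that lack required keys
--     filtered_dicts = [
--         (idx, d) for idx, d in enumerate(dicts)
--         if all(key in d for key in keys)
--     ]
--     to_delete = defaultdict(set)
--
--     # Compare filtered dictionaries pairwise
--     for (idx_a, dict_a), (idx_b, dict_b) in combinations(filtered_dicts, 2):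
--         for key1, key2 in combinations(keys, 2):
--             # Directly compare values (no redundant checks)
--             if dict_a[key1] < dict_b[key1] and dict_a[key2] > dict_b[key2]:
--                 # Mark the appropriate dictionary for key deletion
--                 target_idx = idx_b if abs(dict_b[key1] - dict_b[key2]) > num_dicts else idx_a
--                 to_delete[target_idx].add(key2)
--
--     # Remove keys in a single pass
--     for idx, keys_to_remove in to_delete.items():
--         dicts[idx] = {k: v for k, v in dicts[idx].items() if k not in keys_to_remove}
--
--     return dicts
-- ===== SOURCE B (Python) =====
-- from itertools import combinations
--
-- def process_nested_dicts(dicts, keys):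
--     n = len(dicts)
--     filt = [all(k in d for k in keys) for d in dicts]
--
--     def doomed(i, k):
--         d = dicts[i]
--         for k1, k2 in combinations(keys, 2):
--             if k2 != k:
--                 continue
--             x, y = d[k1], d[k2]
--             if abs(x - y) > n and any(
--                     filt[j] and dicts[j][k1] < x and dicts[j][k2] > y
--                     for j in range(i)):
--                 return True
--             if any(filt[j] and dicts[j][k1] > x and dicts[j][k2] < y
--                    and abs(dicts[j][k1] - dicts[j][k2]) <= n
--                    for j in range(i + 1, n)):
--                 return True
--         return False
--
--     new = [{k: v for k, v in d.items() if not doomed(i, k)} if filt[i] else d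
--            for i, d in enumerate(dicts)]
--     dicts[:] = new
--     return dicts
-- ===== Notes on version B (the rewrite author's own statement) =====
-- stated objective: alternative
-- what changed: A accumulates per-index deletion sets over all pairs of filtered dicts and then rewrites the list in a second pass; B decides each key of each dict directly with an existential scan over earlier/later filtered dicts and rebuilds the list in one comprehension.
import Mathlib
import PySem

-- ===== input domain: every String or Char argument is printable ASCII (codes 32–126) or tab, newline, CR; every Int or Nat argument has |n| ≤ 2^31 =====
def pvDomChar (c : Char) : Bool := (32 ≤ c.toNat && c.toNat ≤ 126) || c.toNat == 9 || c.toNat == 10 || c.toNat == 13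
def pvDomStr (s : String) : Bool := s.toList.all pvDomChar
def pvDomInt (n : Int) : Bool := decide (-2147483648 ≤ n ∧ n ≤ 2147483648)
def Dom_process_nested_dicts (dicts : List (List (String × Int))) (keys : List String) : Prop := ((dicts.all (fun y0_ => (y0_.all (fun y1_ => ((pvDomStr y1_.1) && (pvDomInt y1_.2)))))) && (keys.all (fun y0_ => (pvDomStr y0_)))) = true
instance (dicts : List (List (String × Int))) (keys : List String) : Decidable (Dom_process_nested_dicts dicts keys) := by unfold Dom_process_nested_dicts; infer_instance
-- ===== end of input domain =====

-- B replaces A's pairwise accumulation of per-index deletion sets by a direct per-dict,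
-- per-key existential test (objective: alternative; same asymptotic cost).  Both Pythons
-- mutate `dicts` in place in the same way; the equivalence proved here is about the
-- return value.

-- itertools.combinations(l, 2), shared by both ports
def pvCombs2 {α : Type} : List α → List (α × α)
  | [] => []
  | x :: xs => xs.map (fun y => (x, y)) ++ pvCombs2 xs

-- ===== PORT A =====
-- `d[k]` is ported as `getD _ _ 0`: A only reads keys whose presence its pre-filter
-- guarantees, so the default is never used and the port is exact.  The final dict
-- comprehension over `dicts[idx].items()` is a filter of the association list (a
-- Python dict's keys are unique).
def process_nested_dicts (dicts : List (List (String × Int))) (keys : List String) : List (List (String × Int)) :=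
  let num_dicts : Int := PySem.List.len dicts
  let filtered : List (Int × List (String × Int)) :=
    (PySem.List.enumerate dicts).filter (fun p => keys.all (fun k => (PySem.Dict.mk p.2).contains k))
  let to_delete : PySem.Dict Int (PySem.Set String) :=
    (pvCombs2 filtered).foldl (fun td pr =>
      (pvCombs2 keys).foldl (fun td kp =>
        let da := PySem.Dict.mk pr.1.2
        let db := PySem.Dict.mk pr.2.2
        if da.getD kp.1 0 < db.getD kp.1 0 ∧ da.getD kp.2 0 > db.getD kp.2 0 then
          let target : Int := if |db.getD kp.1 0 - db.getD kp.2 0| > num_dicts then pr.2.1 else pr.1.1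
          td.modify target PySem.Set.empty (fun s => PySem.Set.add s kp.2)
        else td) td) PySem.Dict.empty
  to_delete.items.foldl (fun ds pr =>
    PySem.List.pySetD ds pr.1
      ((PySem.List.pyGetD ds pr.1 []).filter (fun kv => !(PySem.Set.contains pr.2 kv.1)))) dicts

-- ===== PORT B =====
-- Source B's doomed(i, k): the early-returning `for` over key pairs with inner `any(...)`
-- scans becomes `List.any` over the same ranges.
def pvDoomed (dicts : List (List (String × Int))) (filt : List Bool) (n : Int)
    (keys : List String) (i : Int) (k : String) : Bool :=
  let d := PySem.Dict.mk (PySem.List.pyGetD dicts i [])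
  (pvCombs2 keys).any (fun p =>
    if p.2 ≠ k then false else
      let x := d.getD p.1 0
      let y := d.getD p.2 0
      (decide (|x - y| > n) && (PySem.List.pyRange 0 i 1).any (fun j =>
          let dj := PySem.Dict.mk (PySem.List.pyGetD dicts j [])
          filt.getD j.toNat false && decide (dj.getD p.1 0 < x) && decide (dj.getD p.2 0 > y))) ||
      (PySem.List.pyRange (i + 1) n 1).any (fun j =>
          let dj := PySem.Dict.mk (PySem.List.pyGetD dicts j [])
          filt.getD j.toNat false && decide (dj.getD p.1 0 > x) && decide (dj.getD p.2 0 < y) &&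
          decide (|dj.getD p.1 0 - dj.getD p.2 0| ≤ n)))

def process_nested_dicts_alt (dicts : List (List (String × Int))) (keys : List String) : List (List (String × Int)) :=
  let n : Int := PySem.List.len dicts
  let filt : List Bool := dicts.map (fun d => keys.all (fun k => (PySem.Dict.mk d).contains k))
  (PySem.List.enumerate dicts).map (fun p =>
    if filt.getD p.1.toNat false then p.2.filter (fun kv => !(pvDoomed dicts filt n keys p.1 kv.1)) else p.2)

-- ===== PRECONDITION & SPEC =====
def Spec_process_nested_dicts (dicts : List (List (String × Int))) (keys : List String) (out : List (List (String × Int))) : Prop := out = process_nested_dicts_alt dicts keys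
instance (dicts : List (List (String × Int))) (keys : List String) (out : List (List (String × Int))) : Decidable (Spec_process_nested_dicts dicts keys out) := by unfold Spec_process_nested_dicts; infer_instance

-- ===== CLAIM (what is proved, stated in full; the proofs are below) =====
def Claim_equal_process_nested_dicts : Prop := ∀ (dicts : List (List (String × Int))) (keys : List String), Dom_process_nested_dicts dicts keys → Spec_process_nested_dicts dicts keys (process_nested_dicts dicts keys)

-- ===== LEMMAS AND PROOFS =====

theorem pvEnum_cons {α : Type} (x : α) (xs : List α) (s : Int) :
    PySem.List.enumerate (x :: xs) s = (s, x) :: PySem.List.enumerate xs (s + 1) := rfl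

theorem pvEnum_length {α : Type} (xs : List α) (s : Int) :
    (PySem.List.enumerate xs s).length = xs.length := by
  induction xs generalizing s with
  | nil => rfl
  | cons x xs ih => simp [ih]

theorem pvEnum_getElem? {α : Type} (xs : List α) (s : Int) (t : Nat) :
    (PySem.List.enumerate xs s)[t]? = xs[t]?.map (fun x => (s + (t : Int), x)) := by
  induction xs generalizing s t with
  | nil => simp
  | cons x xs ih =>
    cases t with
    | zero => rw [pvEnum_cons]; simp
    | succ t =>
      rw [pvEnum_cons]
      simp [ih (s+1) t]
      cases xs[t]? <;> simp
      ring

theorem pvEnum_mem {α : Type} (xs : List α) (s : Int) (p : Int × α) :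
    p ∈ PySem.List.enumerate xs s ↔ ∃ t : Nat, xs[t]? = some p.2 ∧ p.1 = s + t := by
  rw [List.mem_iff_getElem?]
  constructor
  · rintro ⟨t, ht⟩
    rw [pvEnum_getElem?] at ht
    cases h : xs[t]? with
    | none => rw [h] at ht; simp at ht
    | some x =>
      rw [h] at ht; simp at ht
      exact ⟨t, by simp [h, ← ht], by rw [← ht]⟩
  · rintro ⟨t, ht, hp⟩
    refine ⟨t, ?_⟩
    rw [pvEnum_getElem?, ht]
    cases p; simp_all

theorem pvEnum_pairwise {α : Type} (xs : List α) (s : Int) :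
    (PySem.List.enumerate xs s).Pairwise (fun p q => p.1 < q.1) := by
  induction xs generalizing s with
  | nil => simp
  | cons x xs ih =>
    rw [pvEnum_cons]
    refine List.pairwise_cons.mpr ⟨?_, ih (s+1)⟩
    intro q hq
    obtain ⟨t, -, hq1⟩ := (pvEnum_mem xs (s+1) q).mp hq
    simp; omega

theorem pvCombs2_mem_iff {α : Type} (key : α → Int) (l : List α)
    (h : l.Pairwise (fun a b => key a < key b)) (x y : α) :
    (x, y) ∈ pvCombs2 l ↔ x ∈ l ∧ y ∈ l ∧ key x < key y := by
  induction l with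
  | nil => simp [pvCombs2]
  | cons a l ih =>
    rw [List.pairwise_cons] at h
    obtain ⟨ha, hl⟩ := h
    simp only [pvCombs2, List.mem_append, List.mem_map, List.mem_cons]
    constructor
    · rintro (⟨y', hy', he⟩ | hm)
      · obtain ⟨h1, h2⟩ := Prod.mk.inj he
        subst h1; subst h2
        exact ⟨Or.inl rfl, Or.inr hy', ha _ hy'⟩
      · obtain ⟨hx, hy, hk⟩ := (ih hl).mp hm
        exact ⟨Or.inr hx, Or.inr hy, hk⟩
    · rintro ⟨hx | hx, hy | hy, hk⟩
      · subst hx; subst hy; exact absurd hk (lt_irrefl _)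
      · subst hx; exact Or.inl ⟨y, hy, rfl⟩
      · subst hy; exact absurd hk (not_lt.mpr (le_of_lt (ha x hx)))
      · exact Or.inr ((ih hl).mpr ⟨hx, hy, hk⟩)

theorem pvCombs2_mem_fst {α : Type} (l : List α) (p : α × α) (h : p ∈ pvCombs2 l) :
    p.1 ∈ l ∧ p.2 ∈ l := by
  induction l with
  | nil => simp [pvCombs2] at h
  | cons a l ih =>
    simp only [pvCombs2, List.mem_append, List.mem_map] at h
    rcases h with ⟨y, hy, rfl⟩ | hm
    · exact ⟨List.mem_cons_self .., List.mem_cons_of_mem _ hy⟩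
    · exact ⟨List.mem_cons_of_mem _ (ih hm).1, List.mem_cons_of_mem _ (ih hm).2⟩

theorem pvFoldl_modify_mem {E : Type} (ev : List E) (cond : E → Prop) [DecidablePred cond]
    (tgt : E → Int) (key : E → String) (td0 : PySem.Dict Int (PySem.Set String)) (i : Int) (k : String) :
    (k ∈ (ev.foldl (fun td e => if cond e then td.modify (tgt e) PySem.Set.empty (fun s => s.add (key e)) else td) td0).getD i PySem.Set.empty
      ↔ k ∈ td0.getD i PySem.Set.empty ∨ ∃ e ∈ ev, cond e ∧ tgt e = i ∧ key e = k) := by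
  induction ev generalizing td0 with
  | nil => simp
  | cons e ev ih =>
    simp only [List.foldl_cons, ih]
    have hstep : k ∈ ((if cond e then td0.modify (tgt e) PySem.Set.empty (fun s => s.add (key e)) else td0).getD i PySem.Set.empty)
        ↔ (k ∈ td0.getD i PySem.Set.empty ∨ (cond e ∧ tgt e = i ∧ key e = k)) := by
      by_cases hc : cond e
      · rw [if_pos hc, PySem.Dict.getD_modify]
        by_cases hi : i = tgt e
        · rw [if_pos hi, PySem.Set.mem_add, hi]
          constructor
          · rintro (hm | rfl)
            · exact Or.inl hm
            · exact Or.inr ⟨hc, rfl, rfl⟩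
          · rintro (hm | ⟨-, -, rfl⟩)
            · exact Or.inl hm
            · exact Or.inr rfl
        · rw [if_neg hi]
          constructor
          · exact Or.inl
          · rintro (hm | ⟨-, h2, -⟩)
            · exact hm
            · exact absurd h2.symm hi
      · rw [if_neg hc]
        constructor
        · exact Or.inl
        · rintro (hm | ⟨h1, -, -⟩)
          · exact hm
          · exact absurd h1 hc
    rw [hstep]
    simp only [List.mem_cons]
    constructor
    · rintro ((hm | h) | ⟨e', he', h⟩)
      · exact Or.inl hm
      · exact Or.inr ⟨e, Or.inl rfl, h⟩
      · exact Or.inr ⟨e', Or.inr he', h⟩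
    · rintro (hm | ⟨e', rfl | he', h⟩)
      · exact Or.inl (Or.inl hm)
      · exact Or.inl (Or.inr h)
      · exact Or.inr ⟨e', he', h⟩

theorem pvFoldl_modify_contains {E : Type} (ev : List E) (cond : E → Prop) [DecidablePred cond]
    (tgt : E → Int) (key : E → String) (td0 : PySem.Dict Int (PySem.Set String)) (i : Int) :
    ((ev.foldl (fun td e => if cond e then td.modify (tgt e) PySem.Set.empty (fun s => s.add (key e)) else td) td0).contains i = true
      ↔ td0.contains i = true ∨ ∃ e ∈ ev, cond e ∧ tgt e = i) := by
  induction ev generalizing td0 with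
  | nil => simp
  | cons e ev ih =>
    simp only [List.foldl_cons, ih]
    have hstep : ((if cond e then td0.modify (tgt e) PySem.Set.empty (fun s => s.add (key e)) else td0).contains i = true)
        ↔ (td0.contains i = true ∨ (cond e ∧ tgt e = i)) := by
      by_cases hc : cond e
      · rw [if_pos hc, PySem.Dict.contains_modify]
        rw [Bool.or_eq_true_iff, beq_iff_eq]
        constructor
        · rintro (rfl | hm)
          · exact Or.inr ⟨hc, rfl⟩
          · exact Or.inl hm
        · rintro (hm | ⟨-, rfl⟩)
          · exact Or.inr hm
          · exact Or.inl rfl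
      · rw [if_neg hc]
        constructor
        · exact Or.inl
        · rintro (hm | ⟨h1, -⟩)
          · exact hm
          · exact absurd h1 hc
    rw [hstep]
    simp only [List.mem_cons]
    constructor
    · rintro ((hm | h) | ⟨e', he', h⟩)
      · exact Or.inl hm
      · exact Or.inr ⟨e, Or.inl rfl, h⟩
      · exact Or.inr ⟨e', Or.inr he', h⟩
    · rintro (hm | ⟨e', rfl | he', h⟩)
      · exact Or.inl (Or.inl hm)
      · exact Or.inl (Or.inr h)
      · exact Or.inr ⟨e', he', h⟩

theorem pvFoldl_modify_nodup {E : Type} (ev : List E) (cond : E → Prop) [DecidablePred cond]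
    (tgt : E → Int) (key : E → String) (td0 : PySem.Dict Int (PySem.Set String))
    (h : td0.keys.Nodup) :
    (ev.foldl (fun td e => if cond e then td.modify (tgt e) PySem.Set.empty (fun s => s.add (key e)) else td) td0).keys.Nodup := by
  induction ev generalizing td0 with
  | nil => exact h
  | cons e ev ih =>
    simp only [List.foldl_cons]
    apply ih
    by_cases hc : cond e
    · rw [if_pos hc, PySem.Dict.keys_modify]
      exact PySem.Dict.nodup_keys_insert _ _ _ h
    · rwa [if_neg hc]

theorem pvSetD_in_range {α : Type} (xs : List α) (i : Int) (v : α)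
    (h0 : 0 ≤ i) (h1 : i < (xs.length : Int)) :
    PySem.List.pySetD xs i v = xs.set i.toNat v := by
  simp only [PySem.List.pySetD, PySem.List.pySet?, PySem.List.pyIdx?, if_pos h0, if_pos h1,
    Option.map_some, Option.getD_some]

theorem pvSetD_length {α : Type} (xs : List α) (i : Int) (v : α) :
    (PySem.List.pySetD xs i v).length = xs.length := by
  simp only [PySem.List.pySetD, PySem.List.pySet?, PySem.List.pyIdx?]
  split_ifs <;> simp

theorem pvGetD_int {α : Type} (xs : List α) (i : Int) (d : α)
    (h0 : 0 ≤ i) (h1 : i < (xs.length : Int)) :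
    PySem.List.pyGetD xs i d = xs.getD i.toNat d := by
  rw [PySem.List.pyGetD_eq_getElem xs d h0 h1]
  rw [List.getD_eq_getElem xs d (by omega)]

-- A's final pass: each entry rewrites its own index once
theorem pvFoldl_setD_getD (items : List (Int × PySem.Set String)) (L : List (List (String × Int)))
    (hnd : (items.map Prod.fst).Nodup)
    (hr : ∀ pr ∈ items, 0 ≤ pr.1 ∧ pr.1 < (L.length : Int)) (j : Nat) (hj : j < L.length) :
    (items.foldl (fun ds pr => PySem.List.pySetD ds pr.1
        ((PySem.List.pyGetD ds pr.1 []).filter (fun kv => !(PySem.Set.contains pr.2 kv.1)))) L).getD j []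
    = match items.find? (fun pr => pr.1 == (j : Int)) with
      | some pr => (L.getD j []).filter (fun kv => !(PySem.Set.contains pr.2 kv.1))
      | none => L.getD j [] := by
  induction items generalizing L with
  | nil => simp
  | cons hd tl ih =>
    obtain ⟨hd0, hd1⟩ := hr hd (List.mem_cons_self ..)
    have hget : PySem.List.pyGetD L hd.1 [] = L.getD hd.1.toNat [] := pvGetD_int _ _ _ hd0 hd1
    have hset : PySem.List.pySetD L hd.1 ((PySem.List.pyGetD L hd.1 []).filter (fun kv => !(PySem.Set.contains hd.2 kv.1)))
        = L.set hd.1.toNat ((L.getD hd.1.toNat []).filter (fun kv => !(PySem.Set.contains hd.2 kv.1))) := by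
      rw [hget, pvSetD_in_range _ _ _ hd0 hd1]
    set L' := L.set hd.1.toNat ((L.getD hd.1.toNat []).filter (fun kv => !(PySem.Set.contains hd.2 kv.1))) with hL'
    have hlen : L'.length = L.length := by simp [hL']
    have hLj : ∀ t : Nat, t ≠ hd.1.toNat → L'[t]? = L[t]? := by
      intro t hne
      simp only [hL', List.getElem?_set, if_neg (fun h : hd.1.toNat = t => hne h.symm)]
    simp only [List.foldl_cons, hset]
    rw [ih L' (by simpa using (List.nodup_cons.mp (by simpa using hnd)).2)
        (fun pr hpr => by have := hr pr (List.mem_cons_of_mem _ hpr); omega) (by omega)]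
    by_cases hj' : hd.1 = (j : Int)
    · rw [List.find?_cons_of_pos (h := by simpa using hj')]
      have hnone : tl.find? (fun pr => pr.1 == (j : Int)) = none := by
        rw [List.find?_eq_none]
        intro pr hpr
        simp only [beq_iff_eq]
        intro he
        have hmem : hd.1 ∈ tl.map Prod.fst := by
          rw [← hj'] at he
          exact List.mem_map.mpr ⟨pr, hpr, he⟩
        exact (List.nodup_cons.mp (by simpa using hnd)).1 hmem
      rw [hnone]
      have : L'.getD j [] = (L.getD j []).filter (fun kv => !(PySem.Set.contains hd.2 kv.1)) := by
        have : hd.1.toNat = j := by omega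
        simp only [hL', this, List.getD, List.getElem?_set, if_pos hj]
        simp
      rw [this]
    · rw [List.find?_cons_of_neg (h := by simpa using hj')]
      have hne : j ≠ hd.1.toNat := by omega
      cases hfind : tl.find? (fun pr => pr.1 == (j : Int)) with
      | none => simp only [List.getD, hLj j hne]
      | some pr => simp only [List.getD, hLj j hne]

abbrev pvD := List (String × Int)
abbrev pvE := ((Int × pvD) × (Int × pvD)) × (String × String)

abbrev pvHasAll (K : List String) (d : pvD) : Bool := K.all (fun k => (PySem.Dict.mk d).contains k)
abbrev pvFiltered (L : List pvD) (K : List String) : List (Int × pvD) :=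
  (PySem.List.enumerate L).filter (fun p => pvHasAll K p.2)
abbrev pvCond (e : pvE) : Prop :=
  (PySem.Dict.mk e.1.1.2).getD e.2.1 0 < (PySem.Dict.mk e.1.2.2).getD e.2.1 0 ∧
  (PySem.Dict.mk e.1.1.2).getD e.2.2 0 > (PySem.Dict.mk e.1.2.2).getD e.2.2 0
abbrev pvTgt (L : List pvD) (e : pvE) : Int :=
  if |(PySem.Dict.mk e.1.2.2).getD e.2.1 0 - (PySem.Dict.mk e.1.2.2).getD e.2.2 0| > PySem.List.len L
  then e.1.2.1 else e.1.1.1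
abbrev pvEv (L : List pvD) (K : List String) : List pvE :=
  (pvCombs2 (pvFiltered L K)).flatMap (fun pr => (pvCombs2 K).map (fun kp => (pr, kp)))
def pvToDeleteA (L : List pvD) (K : List String) : PySem.Dict Int (PySem.Set String) :=
  (pvCombs2 (pvFiltered L K)).foldl (fun td pr =>
    (pvCombs2 K).foldl (fun td kp =>
      if pvCond (pr, kp) then td.modify (pvTgt L (pr, kp)) PySem.Set.empty (fun s => s.add kp.2)
      else td) td) PySem.Dict.empty
def pvTD (L : List pvD) (K : List String) : PySem.Dict Int (PySem.Set String) :=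
  (pvEv L K).foldl (fun td e =>
    if pvCond e then td.modify (pvTgt L e) PySem.Set.empty (fun s => s.add e.2.2) else td) PySem.Dict.empty

def pvV (L : List pvD) (i : Int) (k : String) : Int := (PySem.Dict.mk (L.getD i.toNat [])).getD k 0
def pvP (L : List pvD) (K : List String) (i : Int) : Prop :=
  0 ≤ i ∧ i < (L.length : Int) ∧ pvHasAll K (L.getD i.toNat []) = true
def pvNF (L : List pvD) (K : List String) (i : Int) (k : String) : Prop :=
  ∃ p ∈ pvCombs2 K, p.2 = k ∧
    ((|pvV L i p.1 - pvV L i p.2| > (L.length : Int) ∧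
        ∃ t : Int, 0 ≤ t ∧ t < i ∧ pvP L K t ∧ pvV L t p.1 < pvV L i p.1 ∧ pvV L t p.2 > pvV L i p.2)
     ∨ (∃ t : Int, i < t ∧ t < (L.length : Int) ∧ pvP L K t ∧
          pvV L i p.1 < pvV L t p.1 ∧ pvV L i p.2 > pvV L t p.2 ∧
          ¬(|pvV L t p.1 - pvV L t p.2| > (L.length : Int))))

theorem pvToDeleteA_eq (L : List pvD) (K : List String) : pvToDeleteA L K = pvTD L K := by
  unfold pvToDeleteA pvTD
  rw [List.foldl_flatMap]
  congr 1
  funext td pr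
  rw [List.foldl_map]

theorem pvFoldl_setD_len (items : List (Int × PySem.Set String)) (L : List pvD) :
    (items.foldl (fun ds pr => PySem.List.pySetD ds pr.1
        ((PySem.List.pyGetD ds pr.1 []).filter (fun kv => !(PySem.Set.contains pr.2 kv.1)))) L).length
      = L.length := by
  induction items generalizing L with
  | nil => rfl
  | cons hd tl ih => rw [List.foldl_cons, ih, pvSetD_length]

theorem pvMem_filtered (L : List pvD) (K : List String) (p : Int × pvD) :
    p ∈ pvFiltered L K ↔ pvP L K p.1 ∧ p.2 = L.getD p.1.toNat [] := by
  rw [pvFiltered, List.mem_filter, pvEnum_mem]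
  constructor
  · rintro ⟨⟨t, hget, hp1⟩, hall⟩
    have ht : t < L.length := by
      by_contra h
      rw [List.getElem?_eq_none (by omega)] at hget
      cases hget
    have hval : L[t] = p.2 := by
      have := hget
      rw [List.getElem?_eq_getElem ht] at this
      simpa using this
    have htoNat : p.1.toNat = t := by omega
    have hgetD : L.getD p.1.toNat [] = p.2 := by
      rw [htoNat, List.getD_eq_getElem _ _ ht, hval]
    refine ⟨⟨by omega, by omega, ?_⟩, hgetD.symm⟩
    rw [hgetD]
    exact hall
  · rintro ⟨⟨hge0, hlt, hall⟩, hp2⟩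
    have ht : p.1.toNat < L.length := by omega
    refine ⟨⟨p.1.toNat, ?_, by omega⟩, ?_⟩
    · rw [List.getElem?_eq_getElem ht, hp2, List.getD_eq_getElem _ _ ht]
    · rw [hp2]
      exact hall

theorem pvTgt_P (L : List pvD) (K : List String) (e : pvE) (he : e ∈ pvEv L K) :
    pvP L K (pvTgt L e) := by
  simp only [pvEv, List.mem_flatMap, List.mem_map] at he
  obtain ⟨pr, hpr, kp, hkp, rfl⟩ := he
  obtain ⟨h1, h2⟩ := pvCombs2_mem_fst _ _ hpr
  have hP1 := ((pvMem_filtered L K pr.1).mp h1).1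
  have hP2 := ((pvMem_filtered L K pr.2).mp h2).1
  simp only [pvTgt]
  split
  · exact hP2
  · exact hP1

theorem pvEV_iff (L : List pvD) (K : List String) (i : Int) (k : String) :
    (∃ e ∈ pvEv L K, pvCond e ∧ pvTgt L e = i ∧ e.2.2 = k) ↔ pvP L K i ∧ pvNF L K i k := by
  have hpw : (pvFiltered L K).Pairwise (fun a b => a.1 < b.1) :=
    (pvEnum_pairwise L 0).filter _
  have hlen : PySem.List.len L = (L.length : Int) := PySem.List.len_eq L
  constructor
  · rintro ⟨e, he, hc, ht, hk⟩
    simp only [pvEv, List.mem_flatMap, List.mem_map] at he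
    obtain ⟨pr, hpr, kp, hkp, rfl⟩ := he
    obtain ⟨a, b⟩ := pr
    rw [pvCombs2_mem_iff Prod.fst _ hpw] at hpr
    obtain ⟨hma, hmb, hab⟩ := hpr
    obtain ⟨hPa, ha2⟩ := (pvMem_filtered L K a).mp hma
    obtain ⟨hPb, hb2⟩ := (pvMem_filtered L K b).mp hmb
    obtain ⟨hc1, hc2⟩ := hc
    simp only at hc1 hc2
    rw [ha2, hb2] at hc1 hc2
    simp only [pvTgt, hb2, hlen] at ht
    have ht' : (if |pvV L b.1 kp.1 - pvV L b.1 kp.2| > (L.length : Int) then b.1 else a.1) = i := ht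
    by_cases habs : |pvV L b.1 kp.1 - pvV L b.1 kp.2| > (L.length : Int)
    · rw [if_pos habs] at ht'
      subst ht'
      refine ⟨hPb, kp, hkp, hk, Or.inl ⟨habs, a.1, hPa.1, hab, hPa, hc1, hc2⟩⟩
    · rw [if_neg habs] at ht'
      subst ht'
      exact ⟨hPa, kp, hkp, hk, Or.inr ⟨b.1, hab, hPb.2.1, hPb, hc1, hc2, habs⟩⟩
  · rintro ⟨hPi, p, hp, hpk, hbr⟩
    rcases hbr with ⟨habs, t, ht0, hti, hPt, hv1, hv2⟩ | ⟨t, hit, htn, hPt, hv1, hv2, habs⟩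
    · refine ⟨(((t, L.getD t.toNat []), (i, L.getD i.toNat [])), p), ?_, ⟨hv1, hv2⟩, ?_, hpk⟩
      · simp only [pvEv, List.mem_flatMap, List.mem_map]
        refine ⟨((t, L.getD t.toNat []), (i, L.getD i.toNat [])), ?_, p, hp, rfl⟩
        rw [pvCombs2_mem_iff Prod.fst _ hpw]
        exact ⟨(pvMem_filtered L K _).mpr ⟨hPt, rfl⟩, (pvMem_filtered L K _).mpr ⟨hPi, rfl⟩, hti⟩
      · simp only [pvTgt, hlen]
        show (if |pvV L i p.1 - pvV L i p.2| > (L.length : Int) then i else t) = i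
        rw [if_pos habs]
    · refine ⟨(((i, L.getD i.toNat []), (t, L.getD t.toNat [])), p), ?_, ⟨hv1, hv2⟩, ?_, hpk⟩
      · simp only [pvEv, List.mem_flatMap, List.mem_map]
        refine ⟨((i, L.getD i.toNat []), (t, L.getD t.toNat [])), ?_, p, hp, rfl⟩
        rw [pvCombs2_mem_iff Prod.fst _ hpw]
        exact ⟨(pvMem_filtered L K _).mpr ⟨hPi, rfl⟩, (pvMem_filtered L K _).mpr ⟨hPt, rfl⟩, hit⟩
      · simp only [pvTgt, hlen]
        show (if |pvV L t p.1 - pvV L t p.2| > (L.length : Int) then t else i) = i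
        rw [if_neg habs]

theorem pvMap_getD (L : List pvD) (K : List String) (t : Nat) (ht : t < L.length) :
    (L.map (fun d => pvHasAll K d)).getD t false = pvHasAll K (L.getD t []) := by
  rw [List.getD_eq_getElem _ _ (by simpa using ht), List.getElem_map, List.getD_eq_getElem _ _ ht]

theorem pvDoomed_iff (L : List pvD) (K : List String) (i : Int) (k : String)
    (h0 : 0 ≤ i) (h1 : i < (L.length : Int)) :
    pvDoomed L (L.map (fun d => pvHasAll K d)) (PySem.List.len L) K i k = true
      ↔ pvNF L K i k := by
  have hlen : PySem.List.len L = (L.length : Int) := PySem.List.len_eq L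
  have hgetI : PySem.List.pyGetD L i [] = L.getD i.toNat [] := pvGetD_int _ _ _ h0 h1
  have hget : ∀ t : Int, 0 ≤ t → t < (L.length : Int) →
      PySem.List.pyGetD L t [] = L.getD t.toNat [] := fun t a b => pvGetD_int _ _ _ a b
  have hfilt : ∀ t : Int, 0 ≤ t → t < (L.length : Int) →
      ((L.map (fun d => pvHasAll K d)).getD t.toNat false = pvHasAll K (L.getD t.toNat [])) := by
    intro t a b
    exact pvMap_getD L K t.toNat (by omega)
  rw [pvDoomed, List.any_eq_true]
  unfold pvNF
  constructor
  · rintro ⟨p, hp, hcond⟩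
    by_cases hk : p.2 ≠ k
    · rw [if_pos hk] at hcond
      cases hcond
    · rw [not_not] at hk
      rw [if_neg (by simp [hk])] at hcond
      refine ⟨p, hp, hk, ?_⟩
      simp only [hgetI, hlen, Bool.or_eq_true, Bool.and_eq_true, decide_eq_true_eq,
        List.any_eq_true, PySem.List.mem_pyRange_one] at hcond
      rcases hcond with ⟨habs, j, ⟨hj0, hji⟩, hbody⟩ | ⟨j, ⟨hji, hjn⟩, hbody⟩
      · rw [hget j hj0 (by omega), hfilt j hj0 (by omega)] at hbody
        obtain ⟨⟨hfj, hv1⟩, hv2⟩ := hbody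
        exact Or.inl ⟨habs, j, hj0, hji, ⟨hj0, by omega, hfj⟩, hv1, hv2⟩
      · have hj0 : 0 ≤ j := by omega
        rw [hget j hj0 hjn, hfilt j hj0 hjn] at hbody
        obtain ⟨⟨⟨hfj, hv1⟩, hv2⟩, habs2⟩ := hbody
        exact Or.inr ⟨j, by omega, hjn, ⟨hj0, hjn, hfj⟩, hv1, hv2, not_lt.mpr habs2⟩
  · rintro ⟨p, hp, hpk, hbr⟩
    refine ⟨p, hp, ?_⟩
    rw [if_neg (by simp [hpk])]
    simp only [hgetI, hlen, Bool.or_eq_true, Bool.and_eq_true, decide_eq_true_eq,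
      List.any_eq_true, PySem.List.mem_pyRange_one]
    rcases hbr with ⟨habs, t, ht0, hti, ⟨-, htn, hfl⟩, hv1, hv2⟩ |
      ⟨t, hit, htn, ⟨ht0, -, hfl⟩, hv1, hv2, habs⟩
    · refine Or.inl ⟨habs, t, ⟨ht0, hti⟩, ?_⟩
      rw [hget t ht0 htn, hfilt t ht0 htn]
      exact ⟨⟨hfl, hv1⟩, hv2⟩
    · refine Or.inr ⟨t, ⟨by omega, htn⟩, ?_⟩
      rw [hget t ht0 htn, hfilt t ht0 htn]
      exact ⟨⟨⟨hfl, hv1⟩, hv2⟩, not_lt.mp habs⟩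

theorem pvTD_mem (L : List pvD) (K : List String) (i : Int) (k : String) :
    k ∈ (pvTD L K).getD i PySem.Set.empty ↔ pvP L K i ∧ pvNF L K i k := by
  rw [pvTD, pvFoldl_modify_mem, PySem.Dict.getD_empty, ← pvEV_iff]
  simp [PySem.Set.empty]

theorem pvTD_contains (L : List pvD) (K : List String) (i : Int) :
    (pvTD L K).contains i = true ↔ ∃ e ∈ pvEv L K, pvCond e ∧ pvTgt L e = i := by
  rw [pvTD, pvFoldl_modify_contains]
  simp [PySem.Dict.contains_empty]

theorem pvMain (L : List pvD) (K : List String) :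
    process_nested_dicts L K = process_nested_dicts_alt L K := by
  have hA : process_nested_dicts L K
      = (pvToDeleteA L K).items.foldl (fun ds pr => PySem.List.pySetD ds pr.1
          ((PySem.List.pyGetD ds pr.1 []).filter (fun kv => !(PySem.Set.contains pr.2 kv.1)))) L := rfl
  have hB : process_nested_dicts_alt L K
      = (PySem.List.enumerate L).map (fun p =>
          if (L.map (fun d => pvHasAll K d)).getD p.1.toNat false
          then p.2.filter (fun kv => !(pvDoomed L (L.map (fun d => pvHasAll K d))
            (PySem.List.len L) K p.1 kv.1))
          else p.2) := rfl
  rw [hA, hB, pvToDeleteA_eq]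
  have hnd : ((pvTD L K).items.map Prod.fst).Nodup := by
    have := pvFoldl_modify_nodup (pvEv L K) pvCond (pvTgt L) (fun e => e.2.2)
      PySem.Dict.empty PySem.Dict.nodup_keys_empty
    rw [pvTD]
    simpa [PySem.Dict.keys] using this
  have hcontains_mem : ∀ pr ∈ (pvTD L K).items, (pvTD L K).contains pr.1 = true := by
    intro pr hpr
    simp only [PySem.Dict.contains, List.any_eq_true]
    exact ⟨pr, hpr, by simp⟩
  have hr : ∀ pr ∈ (pvTD L K).items, 0 ≤ pr.1 ∧ pr.1 < (L.length : Int) := by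
    intro pr hpr
    obtain ⟨e, he, -, htgt⟩ := (pvTD_contains L K pr.1).mp (hcontains_mem pr hpr)
    have := pvTgt_P L K e he
    rw [htgt] at this
    exact ⟨this.1, this.2.1⟩
  apply List.ext_getElem
  · rw [pvFoldl_setD_len, List.length_map, pvEnum_length]
  · intro j hj1 hj2
    have hjL : j < L.length := by rwa [pvFoldl_setD_len] at hj1
    -- B side
    have hBj : ((PySem.List.enumerate L).map (fun p =>
          if (L.map (fun d => pvHasAll K d)).getD p.1.toNat false
          then p.2.filter (fun kv => !(pvDoomed L (L.map (fun d => pvHasAll K d))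
            (PySem.List.len L) K p.1 kv.1))
          else p.2))[j]
        = (if pvHasAll K (L.getD j [])
           then (L.getD j []).filter (fun kv => !(pvDoomed L (L.map (fun d => pvHasAll K d))
             (PySem.List.len L) K (j : Int) kv.1))
           else L.getD j []) := by
      have hjE : j < (PySem.List.enumerate L).length := by
        rw [pvEnum_length]
        exact hjL
      rw [List.getElem_map]
      have he : (PySem.List.enumerate L)[j]'hjE = ((j : Int), L[j]'hjL) := by
        have h := pvEnum_getElem? L 0 j
        rw [List.getElem?_eq_getElem hjE, List.getElem?_eq_getElem hjL] at h
        simpa using h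
      rw [he]
      simp only [Int.toNat_natCast, pvMap_getD L K j hjL, List.getD_eq_getElem _ _ hjL]
    rw [hBj]
    -- A side
    rw [← List.getD_eq_getElem _ ([] : pvD) hj1]
    rw [pvFoldl_setD_getD _ _ hnd hr j hjL]
    have hgetDj : L.getD j [] = L[j] := List.getD_eq_getElem _ _ hjL
    by_cases hP : pvHasAll K (L.getD j []) = true
    · have hPj : pvP L K (j : Int) := ⟨by omega, by exact_mod_cast hjL, by simpa using hP⟩
      rw [if_pos hP]
      cases hfind : (pvTD L K).items.find? (fun pr => pr.1 == (j : Int)) with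
      | some pr =>
        have hq : (pvTD L K).get? (j : Int) = some pr.2 := by
          simp only [PySem.Dict.get?, hfind, Option.map_some]
        have hgd : (pvTD L K).getD (j : Int) PySem.Set.empty = pr.2 := by
          simp only [PySem.Dict.getD, hq, Option.getD_some]
        show (L.getD j []).filter (fun kv => !(PySem.Set.contains pr.2 kv.1))
            = (L.getD j []).filter (fun kv => !(pvDoomed L (L.map (fun d => pvHasAll K d))
              (PySem.List.len L) K (j : Int) kv.1))
        apply List.filter_congr
        intro kv hkv
        congr 1
        rw [Bool.eq_iff_iff, PySem.Set.contains_iff, ← hgd, pvTD_mem,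
          pvDoomed_iff L K (j : Int) kv.1 (by omega) (by exact_mod_cast hjL)]
        constructor
        · exact And.right
        · exact fun h => ⟨hPj, h⟩
      | none =>
        have hnc : (pvTD L K).contains (j : Int) = false := by
          rw [PySem.Dict.contains_eq_isSome_get?]
          simp only [PySem.Dict.get?, hfind, Option.map_none, Option.isSome_none]
        symm
        apply List.filter_eq_self.mpr
        intro kv hkv
        simp only [Bool.not_eq_eq_eq_not, Bool.not_true]
        by_contra hd
        have hdt : pvDoomed L (L.map (fun d => pvHasAll K d)) (PySem.List.len L)
            K (j : Int) kv.1 = true := by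
          cases hx : pvDoomed L (L.map (fun d => pvHasAll K d)) (PySem.List.len L)
              K (j : Int) kv.1
          · exact absurd hx hd
          · rfl
        have hNF := (pvDoomed_iff L K (j : Int) kv.1 (by omega) (by exact_mod_cast hjL)).mp hdt
        obtain ⟨e, he, hc, ht, -⟩ := (pvEV_iff L K (j : Int) kv.1).mpr ⟨hPj, hNF⟩
        have := (pvTD_contains L K (j : Int)).mpr ⟨e, he, hc, ht⟩
        rw [hnc] at this
        cases this
    · rw [if_neg hP]
      cases hfind : (pvTD L K).items.find? (fun pr => pr.1 == (j : Int)) with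
      | some pr =>
        exfalso
        have hc : (pvTD L K).contains (j : Int) = true := by
          rw [PySem.Dict.contains_eq_isSome_get?]
          simp only [PySem.Dict.get?, hfind, Option.map_some, Option.isSome_some]
        obtain ⟨e, he, -, htgt⟩ := (pvTD_contains L K (j : Int)).mp hc
        have := pvTgt_P L K e he
        rw [htgt] at this
        exact hP (by simpa using this.2.2)
      | none => rfl

-- ===== VERDICT (by name: the statement is the Claim_ definition above) =====
theorem process_nested_dicts_spec : Claim_equal_process_nested_dicts := by
  unfold Claim_equal_process_nested_dicts
  intro dicts keys _hDom
  unfold Spec_process_nested_dicts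
  exact pvMain dicts keys
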